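-- pv_equiv track=rewrite | github.com/v0rtex20k/millimot | millimot/networker.py | frames
-- ===== SOURCE A (Python) =====
-- from typing import List, Tuple, Mapping
--
-- Box = Tuple[int, int, int, int]
--
-- def encode_line(p1: Tuple[int, int], p2: Tuple[int, int])-> Tuple[int, int, int]:
-- 	A = (p1[1] - p2[1])
-- 	B = (p2[0] - p1[0])
-- 	C = (p1[0]*p2[1] - p2[0]*p1[1])
-- 	return A, B, -C
--
-- def frames(box: Box)-> Tuple[Tuple[int, int], Tuple[int, int], Tuple[int, int], Tuple[int, int]]:
-- 	x, y, w, h = box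
-- 	up    = ((x,y), (x+w,y))  		# - (up)
-- 	down  = ((x,y+h), (x+w,y+h))    # - (down)
-- 	left  = ((x,y), (x,y+h))  		# | (left)
-- 	right = ((x+w,y), (x+w,y+h))    # | (right)
-- 	borders = [up, down, left, right]
-- 	return [encode_line(*border) for border in borders]
-- ===== SOURCE B (Python) =====
-- def frames(box):
--     # Closed-form border encodings for an axis-aligned box; no helper, no loop.
--     x, y, w, h = box
--     return [(0, w, w*y),
--             (0, w, w*(y+h)),
--             (-h, 0, -x*h),
--             (-h, 0, -(x+w)*h)]
-- ===== Notes on version B (the rewrite author's own statement) =====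
-- stated objective: simpler
-- what changed: Replaces the general encode_line helper and the comprehension over four point-pair borders with four closed-form tuples computed directly from x,y,w,h.
import Mathlib
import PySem

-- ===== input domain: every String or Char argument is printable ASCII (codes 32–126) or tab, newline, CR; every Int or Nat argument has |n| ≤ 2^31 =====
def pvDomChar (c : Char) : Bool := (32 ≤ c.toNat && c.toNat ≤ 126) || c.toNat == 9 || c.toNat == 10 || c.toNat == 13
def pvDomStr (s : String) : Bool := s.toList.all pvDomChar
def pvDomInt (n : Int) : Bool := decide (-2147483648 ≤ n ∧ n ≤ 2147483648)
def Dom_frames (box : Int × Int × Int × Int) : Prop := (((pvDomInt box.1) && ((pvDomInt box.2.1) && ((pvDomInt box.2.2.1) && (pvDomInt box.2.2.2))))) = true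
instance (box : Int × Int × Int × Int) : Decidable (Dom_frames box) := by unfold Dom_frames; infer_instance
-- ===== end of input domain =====

-- B replaces the encode_line helper and comprehension with four closed-form border tuples (objective: simpler).


-- ===== PORT A =====
def encodeLine (p1 p2 : Int × Int) : Int × Int × Int :=
  let A := p1.2 - p2.2
  let B := p2.1 - p1.1
  let C := p1.1 * p2.2 - p2.1 * p1.2
  (A, B, -C)

def frames (box : Int × Int × Int × Int) : List (Int × Int × Int) :=
  let x := box.1; let y := box.2.1; let w := box.2.2.1; let h := box.2.2.2
  let up    := ((x, y), (x + w, y))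
  let down  := ((x, y + h), (x + w, y + h))
  let left  := ((x, y), (x, y + h))
  let right := ((x + w, y), (x + w, y + h))
  let borders := [up, down, left, right]
  borders.map (fun b => encodeLine b.1 b.2)

-- ===== PORT B =====
def frames_alt (box : Int × Int × Int × Int) : List (Int × Int × Int) :=
  let x := box.1; let y := box.2.1; let w := box.2.2.1; let h := box.2.2.2
  [(0, w, w * y),
   (0, w, w * (y + h)),
   (-h, 0, -x * h),
   (-h, 0, -(x + w) * h)]

-- ===== PRECONDITION & SPEC =====
def Spec_frames (box : Int × Int × Int × Int) (out : List (Int × Int × Int)) : Prop := out = frames_alt box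
instance (box : Int × Int × Int × Int) (out : List (Int × Int × Int)) : Decidable (Spec_frames box out) := by unfold Spec_frames; infer_instance

-- ===== CLAIM (what is proved, stated in full; the proofs are below) =====
def Claim_equal_frames : Prop := ∀ (box : Int × Int × Int × Int), Dom_frames box → Spec_frames box (frames box)

-- ===== LEMMAS AND PROOFS =====

-- ===== VERDICT (by name: the statement is the Claim_ definition above) =====
theorem frames_spec : Claim_equal_frames := by
  intro ⟨x, y, w, h⟩ _
  unfold Spec_frames frames frames_alt encodeLine
  simp only [List.map]
  norm_num
  refine ⟨by ring, by ring, by ring, by ring⟩
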